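-- pv_equiv track=rewrite | github.com/MoumenBaccouch/Algorithm-Checkpoint | Algorithm Checkpoint/First Task.py | count_words_and_vowels
-- ===== SOURCE A (Python) =====
-- def count_words_and_vowels(sentence):
--   """Counts the number of words and vowels in a sentence.
--
--   Args:
--     sentence: A string.
--
--   Returns:
--     A tuple of the number of words, the number of vowels, and the sentence.
--   """
--
--   words = 0
--   vowels = 0
--   for char in sentence:
--     if char == " ":
--       words += 1
--     elif char in "aeiouAEIOU":
--       vowels += 1
--   return words, vowels, sentence
-- ===== SOURCE B (Python) =====
-- def count_words_and_vowels(sentence):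
--   """Counts the number of words and vowels in a sentence.
--
--   Args:
--     sentence: A string.
--
--   Returns:
--     A tuple of the number of words, the number of vowels, and the sentence.
--   """
--   words = sentence.count(" ")
--   vowels = sum(sentence.count(v) for v in "aeiouAEIOU")
--   return words, vowels, sentence
-- ===== Notes on version B (the rewrite author's own statement) =====
-- stated objective: faster
-- what changed: Replaces the single explicit per-character loop with branches by library str.count scans: one count for spaces plus a sum of counts, one per vowel.
import Mathlib
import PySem

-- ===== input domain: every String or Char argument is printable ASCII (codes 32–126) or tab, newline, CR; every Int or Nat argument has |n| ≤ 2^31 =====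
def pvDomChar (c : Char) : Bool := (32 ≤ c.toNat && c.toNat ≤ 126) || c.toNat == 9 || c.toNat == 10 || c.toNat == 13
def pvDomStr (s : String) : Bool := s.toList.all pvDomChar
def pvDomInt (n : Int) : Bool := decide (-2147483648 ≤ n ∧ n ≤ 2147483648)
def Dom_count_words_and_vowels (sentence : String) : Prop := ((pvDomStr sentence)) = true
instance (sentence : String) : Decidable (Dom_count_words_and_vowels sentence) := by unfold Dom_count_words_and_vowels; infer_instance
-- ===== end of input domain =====

-- B replaces the explicit character loop with library count scans (one per target character); same output, idiomatic.

-- ===== PORT A =====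
-- literal port of A: one pass over the characters, two counters
def count_words_and_vowels (sentence : String) : Int × Int × String :=
  let p : Int × Int := sentence.toList.foldl
    (fun (st : Int × Int) c =>
      if c = ' ' then (st.1 + 1, st.2)
      else if ("aeiouAEIOU".toList).contains c then (st.1, st.2 + 1)
      else st)
    (0, 0)
  (p.1, p.2, sentence)

-- ===== PORT B =====
-- literal port of B: words = sentence.count(" "); vowels = sum(sentence.count(v) for v in "aeiouAEIOU")
def count_words_and_vowels_alt (sentence : String) : Int × Int × String :=
  let words : Int := (PySem.Str.count sentence " " : Int)
  let vowels : Int :=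
    (("aeiouAEIOU".toList).map (fun v => (PySem.Str.count sentence (String.ofList [v]) : Int))).sum
  (words, vowels, sentence)

-- ===== PRECONDITION & SPEC =====
def Spec_count_words_and_vowels (sentence : String) (out : Int × Int × String) : Prop := out = count_words_and_vowels_alt sentence
instance (sentence : String) (out : Int × Int × String) : Decidable (Spec_count_words_and_vowels sentence out) := by unfold Spec_count_words_and_vowels; infer_instance

-- ===== CLAIM (what is proved, stated in full; the proofs are below) =====
def Claim_equal_count_words_and_vowels : Prop := ∀ (sentence : String), Dom_count_words_and_vowels sentence → Spec_count_words_and_vowels sentence (count_words_and_vowels sentence)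

-- ===== LEMMAS AND PROOFS =====

-- counting a single character with Python's str.count is List.count
theorem count_go_single (c : Char) : ∀ (l : List Char) (fuel acc : Nat),
    l.length ≤ fuel →
    PySem.Chars.count.go [c] fuel l acc = acc + l.count c := by
  intro l
  induction l with
  | nil =>
    intro fuel acc _
    cases fuel <;> simp [PySem.Chars.count.go]
  | cons h t ih =>
    intro fuel acc hf
    cases fuel with
    | zero => simp at hf
    | succ f =>
      simp only [PySem.Chars.count.go]
      by_cases hc : c = h
      · subst hc
        simp only [List.isPrefixOf, BEq.rfl, Bool.and_self, if_true,
          List.length_singleton, List.drop_one, List.tail_cons]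
        rw [ih f (acc + 1) (by simpa using hf)]
        simp [List.count_cons]
        omega
      · have hpre : ([c].isPrefixOf (h :: t)) = false := by
          simp [List.isPrefixOf, hc]
        simp only [hpre, Bool.false_eq_true, if_false]
        rw [ih f acc (by simpa using hf)]
        simp [List.count_cons]
        exact fun h' => hc h'.symm

theorem chars_count_single (l : List Char) (c : Char) :
    PySem.Chars.count l [c] = l.count c := by
  have := count_go_single c l l.length 0 le_rfl
  simpa [PySem.Chars.count] using this

theorem sum_ite_eq_count (c : Char) (vs : List Char) :
    (vs.map (fun u => if u = c then (1 : Int) else 0)).sum = (vs.count c : Int) := by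
  induction vs with
  | nil => simp
  | cons v vt ih =>
    by_cases hv : v = c <;>
      simp only [List.map_cons, List.sum_cons, if_pos, if_neg, hv, ih, List.count_cons] <;>
      simp [hv] <;> push_cast <;> ring

-- sum of single-character counts over a duplicate-free list = one countP
theorem sum_counts (vs : List Char) (hn : vs.Nodup) : ∀ (l : List Char),
    (vs.map (fun u => (l.count u : Int))).sum = (l.countP (fun c => vs.contains c) : Int) := by
  intro l
  induction l with
  | nil => simp
  | cons c t ih =>
    have hsplit : (vs.map (fun u => ((c :: t).count u : Int))).sum
        = (vs.map (fun u => (t.count u : Int))).sum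
          + (vs.map (fun u => if u = c then (1 : Int) else 0)).sum := by
      rw [← List.sum_map_add]
      congr 1
      apply List.map_congr_left
      intro u _
      rw [List.count_cons]
      by_cases hu : c = u
      · subst hu; simp
      · simp [hu, Ne.symm hu]
    rw [hsplit, ih, sum_ite_eq_count]
    by_cases hm : vs.contains c
    · have hcount : vs.count c = 1 :=
        List.count_eq_one_of_mem hn (by simpa using hm)
      simp only [List.countP_cons, hm, if_true, hcount]
      push_cast
      ring
    · have hcm : c ∉ vs := by simpa using hm
      have hz : vs.count c = 0 := List.count_eq_zero_of_not_mem hcm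
      simp only [List.countP_cons, hm, Bool.false_eq_true, if_false, hz]
      push_cast
      ring

-- characterisation of A's loop (vs = the vowel list; it never contains a space)
theorem foldA (vs : List Char) (hs : vs.contains ' ' = false) (l : List Char) : ∀ (w v : Int),
    l.foldl (fun (st : Int × Int) c =>
      if c = ' ' then (st.1 + 1, st.2)
      else if vs.contains c then (st.1, st.2 + 1)
      else st) (w, v)
    = (w + l.count ' ', v + (l.countP (fun c => vs.contains c) : Int)) := by
  induction l with
  | nil => simp
  | cons c t ih =>
    intro w v
    by_cases hc : c = ' '
    · subst hc
      have hns : ' ' ∉ vs := by simpa using hs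
      simp only [List.foldl_cons, if_pos rfl]
      rw [ih]
      simp [List.count_cons, List.countP_cons, hns]
      push_cast
      ring
    · by_cases hv : vs.contains c
      · simp only [List.foldl_cons, if_neg hc, hv, if_true]
        rw [ih]
        have hcs : (c == ' ') = false := by simp [hc]
        simp only [List.count_cons, List.countP_cons, hv, if_true, hcs, Bool.false_eq_true,
          if_false, Nat.add_zero]
        push_cast
        ring
      · simp only [List.foldl_cons, if_neg hc, hv, Bool.false_eq_true, if_false]
        rw [ih]
        have hcs : (c == ' ') = false := by simp [hc]
        simp only [List.count_cons, List.countP_cons, hv, hcs, Bool.false_eq_true,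
          if_false, Nat.add_zero]

-- ===== VERDICT (by name: the statement is the Claim_ definition above) =====
theorem count_words_and_vowels_spec : Claim_equal_count_words_and_vowels := by
  intro s _
  unfold Spec_count_words_and_vowels count_words_and_vowels count_words_and_vowels_alt
  simp only [foldA ("aeiouAEIOU".toList) (by decide) s.toList 0 0, zero_add]
  have hw : (PySem.Str.count s " " : Int) = (s.toList.count ' ' : Int) := by
    rw [PySem.Str.count_eq]
    have h1 : (" " : String).toList = [' '] := rfl
    rw [h1, chars_count_single]
  have hvmap : (("aeiouAEIOU".toList).map (fun v => (PySem.Str.count s (String.ofList [v]) : Int)))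
      = (("aeiouAEIOU".toList).map (fun v => (s.toList.count v : Int))) := by
    apply List.map_congr_left
    intro u _
    rw [PySem.Str.count_eq]
    have h1 : (String.ofList [u]).toList = [u] := by simp
    rw [h1, chars_count_single]
  simp only [hw, hvmap, ← sum_counts ("aeiouAEIOU".toList) (by decide) s.toList]
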